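-- pv_equiv track=rewrite | github.com/Connoriginal/Learning-Python | assignments/slidingpuzzle.py | set_goal_board
-- ===== SOURCE A (Python) =====
-- def set_goal_board(size):
--     anslist = []
--     for i in range(int(size)):
--         anslist.append([])
--     k = 1
--     for j in anslist:
--         for _ in range(int(size)):
--             if k == size**2:
--                 j.append(int(0))
--             else:
--                 j.append(int(k))
--                 k += 1
--
--     return anslist
-- ===== SOURCE B (Python) =====
-- def set_goal_board(size):
--     n = int(size)
--     if n <= 0:
--         return []
--     flat = list(range(1, n * n)) + [0]
--     return [flat[i * n:(i + 1) * n] for i in range(n)]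
-- ===== Notes on version B (the rewrite author's own statement) =====
-- stated objective: simpler
-- what changed: A simulates a running counter over nested loops with a per-cell zero test and per-row appends; B writes the board in closed form as the flat list [1..n^2-1, 0] and chunks it into n rows by slicing.
import Mathlib
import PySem

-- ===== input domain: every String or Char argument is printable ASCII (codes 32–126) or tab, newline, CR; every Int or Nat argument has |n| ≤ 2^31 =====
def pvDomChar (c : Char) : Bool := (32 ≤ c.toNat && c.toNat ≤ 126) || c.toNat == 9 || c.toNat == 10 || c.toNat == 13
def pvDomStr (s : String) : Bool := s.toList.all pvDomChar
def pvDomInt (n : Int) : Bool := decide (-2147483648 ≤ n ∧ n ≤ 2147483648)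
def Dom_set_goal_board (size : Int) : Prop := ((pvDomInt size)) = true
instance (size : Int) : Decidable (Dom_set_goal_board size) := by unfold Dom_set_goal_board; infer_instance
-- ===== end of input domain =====

-- B builds the goal board in closed form — the flat list [1 .. n*n-1, 0] chunked into n rows by
-- slicing — instead of A's cell-by-cell counter simulation over nested loops; objective: simpler.

-- ===== PORT A =====
-- literal port of A: build n empty rows, then fill each with counter k, appending 0 when k = size**2
def set_goal_board (size : Int) : List (List Int) :=
  let anslist : List (List Int) := (PySem.List.pyRange 0 size 1).map (fun _ => [])
  let res :=
    anslist.foldl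
      (fun (p : List (List Int) × Int) (j : List Int) =>
        let inner :=
          (PySem.List.pyRange 0 size 1).foldl
            (fun (q : List Int × Int) (_ : Int) =>
              if q.2 = size ^ 2 then (q.1 ++ [(0 : Int)], q.2)
              else (q.1 ++ [q.2], q.2 + 1))
            (j, p.2)
        (p.1 ++ [inner.1], inner.2))
      ([], 1)
  res.1

-- ===== PORT B =====
-- literal port of B: flat = list(range(1, n*n)) + [0]; rows = [flat[i*n:(i+1)*n] for i in range(n)]
def set_goal_board_alt (size : Int) : List (List Int) :=
  let n := size
  if n ≤ 0 then []
  else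
    let flat := PySem.List.pyRange 1 (n * n) 1 ++ [(0 : Int)]
    (PySem.List.pyRange 0 n 1).map
      (fun i => PySem.List.slice flat (some (i * n)) (some ((i + 1) * n)))

-- ===== PRECONDITION & SPEC =====
def Spec_set_goal_board (size : Int) (out : List (List Int)) : Prop := out = set_goal_board_alt size
instance (size : Int) (out : List (List Int)) : Decidable (Spec_set_goal_board size out) := by unfold Spec_set_goal_board; infer_instance

-- ===== CLAIM (what is proved, stated in full; the proofs are below) =====
def Claim_equal_set_goal_board : Prop := ∀ (size : Int), Dom_set_goal_board size → Spec_set_goal_board size (set_goal_board size)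

-- ===== LEMMAS AND PROOFS =====

def pvStep (N : Int) (q : List Int × Int) (_x : Int) : List Int × Int :=
  if q.2 = N then (q.1 ++ [(0 : Int)], q.2) else (q.1 ++ [q.2], q.2 + 1)

theorem pvInner_no_zero (N : Int) :
    ∀ (l : List Int) (j : List Int) (k : Int), k + l.length ≤ N →
      l.foldl (pvStep N) (j, k) =
        (j ++ PySem.List.pyRange k (k + l.length) 1, k + l.length) := by
  intro l
  induction l with
  | nil =>
    intro j k h
    simp [PySem.List.pyRange_one_eq_nil (by omega : (k : Int) ≤ k)]
  | cons x xs ih =>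
    intro j k h
    have hk : k < N := by simp at h; omega
    have hstep : pvStep N (j, k) x = (j ++ [k], k + 1) := by
      simp only [pvStep, if_neg (show ¬ ((j, k).2 = N) by simp; omega)]
    rw [List.foldl_cons, hstep, ih (j ++ [k]) (k + 1) (by simp at h ⊢; omega)]
    have hb : k + ((x :: xs).length : Int) = (k + 1) + (xs.length : Int) := by
      simp; ring
    rw [hb, PySem.List.pyRange_one_cons (a := k) (b := k + 1 + (xs.length : Int)) (by omega)]
    simp

theorem pvInner_zero (N : Int) :
    ∀ (l : List Int) (j : List Int) (k : Int), k + l.length = N + 1 → k ≤ N →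
      l.foldl (pvStep N) (j, k) = (j ++ PySem.List.pyRange k N 1 ++ [(0 : Int)], N) := by
  intro l
  induction l with
  | nil =>
    intro j k h hk
    simp at h; omega
  | cons x xs ih =>
    intro j k h hk
    by_cases hkN : k = N
    · have hxs : xs = [] := List.length_eq_zero_iff.mp (by simp at h; omega)
      subst hxs hkN
      simp [pvStep, PySem.List.pyRange_one_eq_nil (le_refl _)]
    · have hstep : pvStep N (j, k) x = (j ++ [k], k + 1) := by
        simp only [pvStep, if_neg (show ¬ ((j, k).2 = N) by simpa using hkN)]
      rw [List.foldl_cons, hstep,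
        ih (j ++ [k]) (k + 1) (by simp at h ⊢; omega) (by omega)]
      rw [PySem.List.pyRange_one_cons (a := k) (b := N) (by omega)]
      simp

-- the intended row i (0-based) of the goal board of size n > 0
def pvRow (n i : Int) : List Int :=
  if i + 1 = n then PySem.List.pyRange (i * n + 1) (n * n) 1 ++ [(0 : Int)]
  else PySem.List.pyRange (i * n + 1) ((i + 1) * n + 1) 1


-- A's outer loop over the m remaining (initially empty) rows, starting at row index i
theorem pvOuter (n : Int) (hn : 0 < n) :
    ∀ (m : Nat) (i : Int) (acc : List (List Int)), 0 ≤ i → i + m = n →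
      (List.replicate m ([] : List Int)).foldl
        (fun (p : List (List Int) × Int) (j : List Int) =>
          (p.1 ++ [((PySem.List.pyRange 0 n 1).foldl (pvStep (n * n)) (j, p.2)).1],
            ((PySem.List.pyRange 0 n 1).foldl (pvStep (n * n)) (j, p.2)).2))
        (acc, i * n + 1) =
      ((acc ++ (List.range m).map (fun t : Nat => pvRow n (i + (t : Int))),
        if m = 0 then i * n + 1 else n * n)) := by
  intro m
  induction m with
  | zero => intro i acc _ _; simp
  | succ m ih =>
    intro i acc hi him
    rw [List.replicate_succ, List.foldl_cons]
    have hlen : ((PySem.List.pyRange 0 n 1).length : Int) = n := by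
      rw [PySem.List.length_pyRange_one]; omega
    by_cases hm : m = 0
    · subst hm
      have hin : i = n - 1 := by simp at him; omega
      have hinner : (PySem.List.pyRange 0 n 1).foldl (pvStep (n * n)) (([] : List Int), i * n + 1)
          = ([] ++ PySem.List.pyRange (i * n + 1) (n * n) 1 ++ [(0 : Int)], n * n) := by
        apply pvInner_zero
        · rw [hlen]; subst hin; ring
        · subst hin; nlinarith
      simp only [hinner, List.nil_append, List.replicate_zero, List.foldl_nil]
      rw [Prod.mk.injEq]
      refine ⟨?_, by simp⟩
      simp [pvRow, show i + 1 = n by omega]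
    · have harg : i * n + 1 + ((PySem.List.pyRange 0 n 1).length : Int) = (i + 1) * n + 1 := by
        rw [hlen]; ring
      have hinner : (PySem.List.pyRange 0 n 1).foldl (pvStep (n * n)) (([] : List Int), i * n + 1)
          = ([] ++ PySem.List.pyRange (i * n + 1) ((i + 1) * n + 1) 1, (i + 1) * n + 1) := by
        rw [← harg]
        apply pvInner_no_zero
        rw [hlen]
        have hi1 : i + 1 ≤ n - 1 := by simp at him; omega
        nlinarith
      simp only [hinner, List.nil_append]
      rw [ih (i + 1) _ (by omega) (by simp at him ⊢; omega)]
      rw [Prod.mk.injEq]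
      refine ⟨?_, by simp [hm]⟩
      rw [List.append_assoc]
      congr 1
      rw [List.range_succ_eq_map, List.map_cons, List.map_map]
      have hhead : PySem.List.pyRange (i * n + 1) ((i + 1) * n + 1) 1
          = pvRow n (i + ((0 : Nat) : Int)) := by
        simp [pvRow, show ¬ (i + 1 = n) by simp at him; omega]
      have htail : (List.range m).map (fun t : Nat => pvRow n (i + 1 + (t : Int)))
          = (List.range m).map ((fun t : Nat => pvRow n (i + (t : Int))) ∘ Nat.succ) := by
        apply List.map_congr_left
        intro t _
        simp only [Function.comp_apply]
        congr 1
        push_cast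
        ring
      rw [hhead, htail]
      simp


-- B's slice of the flat list is exactly row i
theorem pvSlice_row (n : Int) (hn : 0 < n) (i : Int) (h0 : 0 ≤ i) (hi : i < n) :
    PySem.List.slice (PySem.List.pyRange 1 (n * n) 1 ++ [(0 : Int)])
        (some (i * n)) (some ((i + 1) * n)) = pvRow n i := by
  have hin : 0 ≤ i * n := by positivity
  have hsplit : PySem.List.pyRange 1 (n * n) 1
      = PySem.List.pyRange 1 (i * n + 1) 1 ++ PySem.List.pyRange (i * n + 1) (n * n) 1 := by
    apply PySem.List.pyRange_one_append
    · omega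
    · nlinarith
  have hlen1 : (PySem.List.pyRange 1 (i * n + 1) 1).length = (i * n).toNat := by
    rw [PySem.List.length_pyRange_one]; congr 1; omega
  have hgoal : PySem.List.slice (PySem.List.pyRange 1 (n * n) 1 ++ [(0 : Int)])
      (some (i * n)) (some ((i + 1) * n))
      = ((PySem.List.pyRange (i * n + 1) (n * n) 1 ++ [(0 : Int)]).take n.toNat) := by
    rw [PySem.List.slice_toNat (PySem.List.pyRange 1 (n * n) 1 ++ [(0 : Int)]) hin (by positivity)]
    rw [hsplit, List.append_assoc, List.drop_append_of_le_length (by omega), ← hlen1,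
        List.drop_length, List.nil_append]
    congr 1
    have h2 : ((i + 1) * n).toNat = (i * n).toNat + n.toNat := by
      have h3 : (i + 1) * n = i * n + n := by ring
      omega
    omega
  rw [hgoal]
  by_cases hlast : i + 1 = n
  · have hlen2 : (PySem.List.pyRange (i * n + 1) (n * n) 1 ++ [(0 : Int)]).length = n.toNat := by
      simp [PySem.List.length_pyRange_one]
      have h1 : n * n - (i * n + 1) = n - 1 := by rw [← hlast]; ring
      rw [h1]; omega
    rw [← hlen2, List.take_length]
    simp [pvRow, hlast]
  · have hsplit2 : PySem.List.pyRange (i * n + 1) (n * n) 1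
        = PySem.List.pyRange (i * n + 1) ((i + 1) * n + 1) 1
          ++ PySem.List.pyRange ((i + 1) * n + 1) (n * n) 1 := by
      apply PySem.List.pyRange_one_append
      · nlinarith
      · have h4 : i + 2 ≤ n := by omega
        nlinarith
    have hlen3 : (PySem.List.pyRange (i * n + 1) ((i + 1) * n + 1) 1).length = n.toNat := by
      rw [PySem.List.length_pyRange_one]
      have h5 : (i + 1) * n + 1 - (i * n + 1) = n := by ring
      rw [h5]
    rw [hsplit2, List.append_assoc, List.take_append_of_le_length (by omega), ← hlen3,
        List.take_length]
    simp [pvRow, hlast]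

-- ===== VERDICT (by name: the statement is the Claim_ definition above) =====
theorem set_goal_board_spec : Claim_equal_set_goal_board := by
  intro size _
  unfold Spec_set_goal_board

  unfold set_goal_board set_goal_board_alt
  by_cases hn : size ≤ 0
  · simp [hn, PySem.List.pyRange_one_eq_nil (show size ≤ 0 from hn)]
  · rw [not_le] at hn
    simp only [if_neg (by omega : ¬ size ≤ 0)]
    have hans : (PySem.List.pyRange 0 size 1).map (fun _ => ([] : List Int))
        = List.replicate size.toNat ([] : List Int) := by
      rw [List.eq_replicate_iff]
      refine ⟨by simp [PySem.List.length_pyRange_one], ?_⟩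
      intro b hb; simp at hb; exact hb.2
    have hsame :
        (fun (p : List (List Int) × Int) (j : List Int) =>
          let inner := (PySem.List.pyRange 0 size 1).foldl
            (fun (q : List Int × Int) (_ : Int) =>
              if q.2 = size ^ 2 then (q.1 ++ [(0 : Int)], q.2)
              else (q.1 ++ [q.2], q.2 + 1)) (j, p.2)
          (p.1 ++ [inner.1], inner.2))
        = (fun (p : List (List Int) × Int) (j : List Int) =>
          (p.1 ++ [((PySem.List.pyRange 0 size 1).foldl (pvStep (size * size)) (j, p.2)).1],
            ((PySem.List.pyRange 0 size 1).foldl (pvStep (size * size)) (j, p.2)).2)) := by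
      funext p j
      rw [pow_two]
      have hf : (fun (q : List Int × Int) (_x : Int) =>
          if q.2 = size * size then (q.1 ++ [(0 : Int)], q.2) else (q.1 ++ [q.2], q.2 + 1))
          = pvStep (size * size) := by
        funext q x; simp [pvStep]
      rw [hf]
    simp only [hans, hsame]
    have houter := pvOuter size hn size.toNat 0 [] (le_refl 0) (by omega)
    rw [show (0 : Int) * size + 1 = 1 by ring] at houter
    rw [houter]
    simp only [List.nil_append]
    rw [PySem.List.pyRange_one 0 size]
    have hsz : (size - 0).toNat = size.toNat := by omega
    rw [hsz, List.map_map]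
    apply List.map_congr_left
    intro t ht
    simp only [Function.comp_apply]
    rw [pvSlice_row size hn (0 + (t : Int)) (by omega) (by simp at ht; omega)]
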